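-- pv_equiv track=rewrite | github.com/TetsuUeyama/game | scripts/blender/voxelize/voxelize_clothing_for_body.py | find_clusters_2d
-- ===== SOURCE A (Python) =====
-- def find_clusters_2d(positions):
--     pos_set = set(positions); visited = set(); clusters = []
--     for pos in pos_set:
--         if pos in visited: continue
--         cluster = set(); queue = [pos]
--         while queue:
--             p = queue.pop()
--             if p in visited: continue
--             visited.add(p); cluster.add(p)
--             for dx, dy in [(1,0),(-1,0),(0,1),(0,-1)]:
--                 nb = (p[0]+dx, p[1]+dy)
--                 if nb in pos_set and nb not in visited: queue.append(nb)
--         clusters.append(cluster)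
--     return clusters
-- ===== SOURCE B (Python) =====
-- def find_clusters_2d(positions):
--     pos_set = set(positions)
--     visited = set()
--
--     def dfs(p):
--         if p not in pos_set or p in visited:
--             return []
--         visited.add(p)
--         x, y = p
--         return [p] + dfs((x, y - 1)) + dfs((x, y + 1)) + dfs((x - 1, y)) + dfs((x + 1, y))
--
--     return [set(dfs(pos)) for pos in pos_set if pos not in visited]
-- ===== Notes on version B (the rewrite author's own statement) =====
-- stated objective: alternative
-- what changed: Replaces A's imperative worklist (explicit stack with pop-time visited checks, push-time neighbour filtering, and a mutated cluster set) by a functional recursive DFS that RETURNS the list of newly reached cells as a concatenation of one sublist per direction; clusters are built as [set(dfs(pos)) for pos in pos_set if pos not in visited].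
import Mathlib
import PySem

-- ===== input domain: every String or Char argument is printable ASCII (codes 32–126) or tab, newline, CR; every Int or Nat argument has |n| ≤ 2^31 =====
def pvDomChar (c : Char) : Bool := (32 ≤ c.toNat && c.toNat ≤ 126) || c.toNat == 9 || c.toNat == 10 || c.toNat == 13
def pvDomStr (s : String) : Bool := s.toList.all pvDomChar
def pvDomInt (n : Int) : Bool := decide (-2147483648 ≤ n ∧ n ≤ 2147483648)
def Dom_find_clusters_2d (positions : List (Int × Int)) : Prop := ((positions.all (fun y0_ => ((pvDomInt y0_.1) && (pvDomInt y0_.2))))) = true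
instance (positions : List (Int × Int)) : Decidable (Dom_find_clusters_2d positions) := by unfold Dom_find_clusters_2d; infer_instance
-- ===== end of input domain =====

-- B replaces A's explicit stack worklist by a functional recursive DFS returning the list of
-- newly reached cells (objective: alternative decomposition, same cost).
-- Note: the cluster-list order of the Python programs follows Python's set iteration (hash) order; outputs are compared as sets.

-- ===== PORT A =====
-- A's neighbour offsets, in A's order
def pvDirsA : List (Int × Int) := [(1, 0), (-1, 0), (0, 1), (0, -1)]

-- A's inner `while queue:` loop; the Python list `queue` (append / pop at the END) is represented
-- head-as-top; fuel only makes the loop total, 1 + 5*|pos_set| is proved sufficient below.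
def pvADfs (ps : List (Int × Int)) : Nat → List (Int × Int) → List (Int × Int) → List (Int × Int) →
    (List (Int × Int) × List (Int × Int))
  | 0, visited, _, cluster => (visited, cluster)
  | _ + 1, visited, [], cluster => (visited, cluster)
  | fuel + 1, visited, p :: queue, cluster =>
    if visited.contains p then pvADfs ps fuel visited queue cluster
    else
      let visited' := PySem.Set.add visited p
      let cluster' := PySem.Set.add cluster p
      let queue' := pvDirsA.foldl (fun acc d =>
        let nb : Int × Int := (p.1 + d.1, p.2 + d.2)
        if ps.contains nb && !visited'.contains nb then nb :: acc else acc) queue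
      pvADfs ps fuel visited' queue' cluster'

def find_clusters_2d (positions : List (Int × Int)) : List (List (Int × Int)) :=
  let pos_set := PySem.Set.ofList positions
  (pos_set.foldl (fun (st : List (Int × Int) × List (List (Int × Int))) pos =>
      if st.1.contains pos then st
      else
        let r := pvADfs pos_set (1 + 5 * pos_set.length) st.1 [pos] []
        (r.1, st.2 ++ [r.2])) ([], [])).2

-- ===== PORT B =====
-- Source B's `dfs`: returns (visited, list of newly reached cells in visit order); the Python
-- recursion is unbounded, fuel only makes it total, 1 + |pos_set| is proved sufficient below.
def pvBDfs (ps : List (Int × Int)) : Nat → List (Int × Int) → (Int × Int) →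
    (List (Int × Int) × List (Int × Int))
  | 0, visited, _ => (visited, [])
  | fuel + 1, visited, p =>
    if !ps.contains p || visited.contains p then (visited, [])
    else
      let visited0 := PySem.Set.add visited p
      let r1 := pvBDfs ps fuel visited0 (p.1, p.2 - 1)
      let r2 := pvBDfs ps fuel r1.1 (p.1, p.2 + 1)
      let r3 := pvBDfs ps fuel r2.1 (p.1 - 1, p.2)
      let r4 := pvBDfs ps fuel r3.1 (p.1 + 1, p.2)
      (r4.1, p :: (r1.2 ++ r2.2 ++ r3.2 ++ r4.2))

-- Source B's comprehension `[set(dfs(pos)) for pos in pos_set if pos not in visited]`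
def pvBCollect (ps : List (Int × Int)) (fuel : Nat) :
    List (Int × Int) → List (Int × Int) → List (List (Int × Int))
  | [], _ => []
  | pos :: rest, visited =>
    if visited.contains pos then pvBCollect ps fuel rest visited
    else
      let r := pvBDfs ps fuel visited pos
      PySem.Set.ofList r.2 :: pvBCollect ps fuel rest r.1

def find_clusters_2d_alt (positions : List (Int × Int)) : List (List (Int × Int)) :=
  let pos_set := PySem.Set.ofList positions
  pvBCollect pos_set (1 + pos_set.length) pos_set []

-- ===== PRECONDITION & SPEC =====
def Spec_find_clusters_2d (positions : List (Int × Int)) (out : List (List (Int × Int))) : Prop := out = find_clusters_2d_alt positions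
instance (positions : List (Int × Int)) (out : List (List (Int × Int))) : Decidable (Spec_find_clusters_2d positions out) := by unfold Spec_find_clusters_2d; infer_instance

-- ===== CLAIM (what is proved, stated in full; the proofs are below) =====
def Claim_equal_find_clusters_2d : Prop := ∀ (positions : List (Int × Int)), Dom_find_clusters_2d positions → Spec_find_clusters_2d positions (find_clusters_2d positions)

-- ===== LEMMAS AND PROOFS =====

-- B's neighbour order as offsets (used only by the proof's intermediate flood function)
def pvDirsB : List (Int × Int) := [(0, -1), (0, 1), (-1, 0), (1, 0)]

-- proof-only intermediate: A's DFS reformulated as a recursion over one start cell,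
-- threading (visited, cluster) exactly as A accumulates them
def pvBFlood (ps : List (Int × Int)) : Nat → (List (Int × Int) × List (Int × Int)) → (Int × Int) →
    (List (Int × Int) × List (Int × Int))
  | 0, st, _ => st
  | fuel + 1, st, p =>
    if st.1.contains p then st
    else
      let st' := (PySem.Set.add st.1 p, PySem.Set.add st.2 p)
      pvDirsB.foldl (fun st d =>
        let nb : Int × Int := (p.1 + d.1, p.2 + d.2)
        if ps.contains nb then pvBFlood ps fuel st nb else st) st'

-- number of cells of ps not yet visited
def pvUnv (ps v : List (Int × Int)) : Nat := (ps.filter (fun x => !v.contains x)).length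

def pvSub (v w : List (Int × Int)) : Prop := ∀ x, x ∈ v → x ∈ w

theorem pvSub_refl (v : List (Int × Int)) : pvSub v v := fun _ h => h

theorem pvSub_trans {u v w : List (Int × Int)} (h1 : pvSub u v) (h2 : pvSub v w) : pvSub u w :=
  fun x h => h2 x (h1 x h)

theorem pvSub_add (v : List (Int × Int)) (p : Int × Int) : pvSub v (PySem.Set.add v p) :=
  fun x hx => (PySem.Set.mem_add v p x).mpr (Or.inl hx)

theorem pv_filter_le {α : Type} (P Q : α → Bool) (h : ∀ x, P x = true → Q x = true) :
    ∀ l : List α, (l.filter P).length ≤ (l.filter Q).length := by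
  intro l
  induction l with
  | nil => simp
  | cons a l ih =>
    simp only [List.filter_cons]
    by_cases hP : P a = true
    · rw [if_pos hP, if_pos (h a hP)]
      simp only [List.length_cons]
      omega
    · rw [if_neg hP]
      by_cases hQ : Q a = true
      · rw [if_pos hQ]
        simp only [List.length_cons]
        omega
      · rw [if_neg hQ]
        exact ih

theorem pv_filter_lt {α : Type} (P Q : α → Bool) (h : ∀ x, P x = true → Q x = true)
    (a : α) (hQ : Q a = true) (hP : P a = false) :
    ∀ l : List α, a ∈ l → (l.filter P).length < (l.filter Q).length := by
  intro l
  induction l with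
  | nil => intro ha; cases ha
  | cons b l ih =>
    intro ha
    simp only [List.filter_cons]
    rcases List.mem_cons.mp ha with rfl | hb
    · rw [if_neg (by simp [hP]), if_pos hQ]
      simp only [List.length_cons]
      have := pv_filter_le P Q h l
      omega
    · have hl := ih hb
      by_cases hPb : P b = true
      · rw [if_pos hPb, if_pos (h b hPb)]
        simp only [List.length_cons]
        omega
      · rw [if_neg hPb]
        by_cases hQb : Q b = true
        · rw [if_pos hQb]
          simp only [List.length_cons]
          omega
        · rw [if_neg hQb]
          exact hl

theorem pvUnv_mono {ps v w : List (Int × Int)} (h : pvSub v w) : pvUnv ps w ≤ pvUnv ps v := by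
  apply pv_filter_le
  intro x hx
  by_cases hxv : x ∈ v
  · have := h x hxv
    simp [List.contains_eq_mem, this] at hx
  · simp [List.contains_eq_mem, hxv]

theorem pvUnv_drop {ps v : List (Int × Int)} {p : Int × Int}
    (hp : p ∈ ps) (hv : p ∉ v) :
    pvUnv ps (PySem.Set.add v p) < pvUnv ps v := by
  have himp : ∀ x, (!(PySem.Set.add v p).contains x) = true → (!v.contains x) = true := by
    intro x hx
    by_cases hxv : x ∈ v
    · have : x ∈ PySem.Set.add v p := pvSub_add v p x hxv
      simp [List.contains_eq_mem, this] at hx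
    · simp [List.contains_eq_mem, hxv]
  have hQ : (!v.contains p) = true := by simp [List.contains_eq_mem, hv]
  have hP : (!(PySem.Set.add v p).contains p) = false := by
    have : p ∈ PySem.Set.add v p := (PySem.Set.mem_add v p p).mpr (Or.inr rfl)
    simp [List.contains_eq_mem, this]
  exact pv_filter_lt _ _ himp p hQ hP ps hp

theorem pvUnv_le_len (ps v : List (Int × Int)) : pvUnv ps v ≤ ps.length :=
  List.length_filter_le _ _

-- a fold whose every step grows visited grows visited
theorem pv_foldl_sub {α : Type} (f : (List (Int × Int) × List (Int × Int)) → α → (List (Int × Int) × List (Int × Int)))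
    (hf : ∀ st x, pvSub st.1 (f st x).1) :
    ∀ (l : List α) st, pvSub st.1 (l.foldl f st).1 := by
  intro l
  induction l with
  | nil => intro st; exact pvSub_refl _
  | cons a l ih =>
    intro st
    exact pvSub_trans (hf st a) (ih (f st a))

-- two folds agree when their steps agree on (and preserve) an invariant
theorem pv_foldl_congr {α : Type} (f g : (List (Int × Int) × List (Int × Int)) → α → (List (Int × Int) × List (Int × Int)))
    (P : (List (Int × Int) × List (Int × Int)) → Prop)
    (hfg : ∀ st x, P st → f st x = g st x)
    (hP : ∀ st x, P st → P (f st x)) :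
    ∀ (l : List α) st, P st → l.foldl f st = l.foldl g st := by
  intro l
  induction l with
  | nil => intro st _; rfl
  | cons a l ih =>
    intro st hst
    simp only [List.foldl_cons]
    rw [← hfg st a hst]
    exact ih (f st a) (hP st a hst)

-- a fold whose every step preserves a predicate preserves it
theorem pv_foldl_pres {α : Type} (f : (List (Int × Int) × List (Int × Int)) → α → (List (Int × Int) × List (Int × Int)))
    (P : (List (Int × Int) × List (Int × Int)) → Prop)
    (hP : ∀ st x, P st → P (f st x)) :
    ∀ (l : List α) st, P st → P (l.foldl f st) := by
  intro l
  induction l with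
  | nil => intro st h; exact h
  | cons a l ih =>
    intro st hst
    exact ih (f st a) (hP st a hst)

-- pvBFlood is a no-op on a visited cell (any fuel)
theorem pvBFlood_noop (ps : List (Int × Int)) (fuel : Nat)
    (st : List (Int × Int) × List (Int × Int)) (p : Int × Int)
    (h : p ∈ st.1) : pvBFlood ps fuel st p = st := by
  cases fuel with
  | zero => rfl
  | succ f => rw [pvBFlood]; simp [List.contains_eq_mem, h]

-- pvBFlood only grows visited
theorem pvBFlood_mono (ps : List (Int × Int)) :
    ∀ (fuel : Nat) (st : List (Int × Int) × List (Int × Int)) (p : Int × Int),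
      pvSub st.1 (pvBFlood ps fuel st p).1 := by
  intro fuel
  induction fuel with
  | zero => intro st p; exact pvSub_refl _
  | succ f ih =>
    intro st p
    rw [pvBFlood]
    split
    · exact pvSub_refl _
    · refine pvSub_trans (pvSub_add st.1 p) ?_
      exact pv_foldl_sub _ (by
        intro st' x
        simp only
        split
        · exact ih st' _
        · exact pvSub_refl _) pvDirsB (PySem.Set.add st.1 p, PySem.Set.add st.2 p)

-- fuel stability of pvBFlood: any fuel ≥ 1 + unvisited count gives the same result
theorem pvBFlood_stable (ps : List (Int × Int)) :
    ∀ (n : Nat) (v cl : List (Int × Int)) (p : Int × Int) (f g : Nat),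
      pvUnv ps v ≤ n → 1 + pvUnv ps v ≤ f → 1 + pvUnv ps v ≤ g → p ∈ ps →
      pvBFlood ps f (v, cl) p = pvBFlood ps g (v, cl) p := by
  intro n
  induction n with
  | zero =>
    intro v cl p f g hn hf hg hp
    by_cases hv : p ∈ v
    · rw [pvBFlood_noop _ _ _ _ hv, pvBFlood_noop _ _ _ _ hv]
    · exfalso
      have hmem : p ∈ ps.filter (fun x => !v.contains x) := by
        rw [List.mem_filter]
        exact ⟨hp, by simp [List.contains_eq_mem, hv]⟩
      have : 0 < pvUnv ps v := List.length_pos_of_mem hmem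
      omega
  | succ n ih =>
    intro v cl p f g hn hf hg hp
    by_cases hv : p ∈ v
    · rw [pvBFlood_noop _ _ _ _ hv, pvBFlood_noop _ _ _ _ hv]
    · obtain ⟨f', rfl⟩ : ∃ f', f = f' + 1 := ⟨f - 1, by omega⟩
      obtain ⟨g', rfl⟩ : ∃ g', g = g' + 1 := ⟨g - 1, by omega⟩
      rw [pvBFlood, pvBFlood]
      simp only [List.contains_eq_mem, hv, decide_false, Bool.false_eq_true, if_false]
      have hdrop : pvUnv ps (PySem.Set.add v p) < pvUnv ps v := pvUnv_drop hp hv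
      apply pv_foldl_congr _ _ (fun st => pvSub (PySem.Set.add v p) st.1)
      · intro st d hst
        dsimp only
        split
        · rename_i hnb
          obtain ⟨v0, cl0⟩ := st
          have h1 : pvUnv ps v0 ≤ pvUnv ps (PySem.Set.add v p) := pvUnv_mono hst
          apply ih v0 cl0 _ f' g' (by omega) (by omega) (by omega)
          simpa [List.contains_eq_mem] using hnb
        · rfl
      · intro st d hst
        dsimp only
        split
        · exact pvSub_trans hst (pvBFlood_mono ps f' st _)
        · exact hst
      · exact pvSub_refl _

-- shape of A's push loop: conditional cons-fold = reversed filtered map, prepended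
theorem foldl_consif {α β : Type} (g : α → β) (c : β → Bool) :
    ∀ (l : List α) (acc : List β),
      l.foldl (fun acc x => if c (g x) then g x :: acc else acc) acc
        = ((l.map g).filter c).reverse ++ acc := by
  intro l
  induction l with
  | nil => intro acc; simp
  | cons x l ih =>
    intro acc
    simp only [List.foldl_cons, List.map_cons, List.filter_cons]
    by_cases hc : c (g x) = true
    · simp [hc, ih]
    · simp [Bool.eq_false_iff.mpr hc, ih]

theorem dirsA_reverse : pvDirsA.reverse = pvDirsB := by decide

-- B's neighbour fold absorbs A's push-time filter (already-visited cells are no-ops)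
theorem fold_filter_absorb (ps : List (Int × Int)) (p : Int × Int) (v' : List (Int × Int))
    (F G : Nat)
    (hF : ∀ (st : List (Int × Int) × List (Int × Int)) (x : Int × Int),
        pvSub v' st.1 → x ∈ ps → pvBFlood ps F st x = pvBFlood ps G st x) :
    ∀ (ds : List (Int × Int)) (st : List (Int × Int) × List (Int × Int)), pvSub v' st.1 →
      ((ds.map (fun d => ((p.1 + d.1, p.2 + d.2) : Int × Int))).filter
          (fun nb => ps.contains nb && !v'.contains nb)).foldl
        (fun st x => pvBFlood ps F st x) st
      = ds.foldl (fun st d =>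
          let nb : Int × Int := (p.1 + d.1, p.2 + d.2)
          if ps.contains nb then pvBFlood ps G st nb else st) st := by
  intro ds
  induction ds with
  | nil => intro st _; rfl
  | cons d ds ih =>
    intro st hsub
    simp only [List.map_cons, List.filter_cons, List.foldl_cons]
    by_cases hps : (p.1 + d.1, p.2 + d.2) ∈ ps
    · by_cases hvv : (p.1 + d.1, p.2 + d.2) ∈ v'
      · rw [if_neg (by simp [List.contains_eq_mem, hps, hvv]),
          if_pos (by simp [List.contains_eq_mem, hps])]
        rw [pvBFlood_noop _ _ _ _ (hsub _ hvv)]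
        exact ih st hsub
      · rw [if_pos (by simp [List.contains_eq_mem, hps, hvv]),
          if_pos (by simp [List.contains_eq_mem, hps])]
        simp only [List.foldl_cons]
        rw [hF st _ hsub hps]
        exact ih _ (pvSub_trans hsub (pvBFlood_mono ps G st _))
    · rw [if_neg (by simp [List.contains_eq_mem, hps]),
        if_neg (by simp [List.contains_eq_mem, hps])]
      exact ih st hsub

-- KEY: A's stack loop computes the fold of the intermediate flood over the stack (top first)
theorem pvKey (ps : List (Int × Int)) :
    ∀ (n : Nat) (v q cl : List (Int × Int)) (f : Nat),
      (∀ x ∈ q, x ∈ ps) →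
      5 * pvUnv ps v + q.length ≤ n →
      5 * pvUnv ps v + q.length ≤ f →
      pvADfs ps f v q cl = q.foldl (fun st x => pvBFlood ps (1 + ps.length) st x) (v, cl) := by
  intro n
  induction n with
  | zero =>
    intro v q cl f hq hn hf
    have hq0 : q = [] := by
      cases q with
      | nil => rfl
      | cons a l => simp only [List.length_cons] at hn; exact absurd hn (by omega)
    subst hq0
    cases f with
    | zero => rfl
    | succ f => rfl
  | succ n ih =>
    intro v q cl f hq hn hf
    cases q with
    | nil =>
      cases f with
      | zero => rfl
      | succ f => rfl
    | cons p q' =>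
      simp only [List.length_cons] at hn hf
      obtain ⟨f0, rfl⟩ : ∃ f0, f = f0 + 1 := ⟨f - 1, by omega⟩
      have hp : p ∈ ps := hq p (by simp)
      have hq' : ∀ x ∈ q', x ∈ ps := fun x hx => hq x (by simp [hx])
      rw [pvADfs]
      by_cases hv : p ∈ v
      · rw [if_pos (by simp [List.contains_eq_mem, hv])]
        rw [ih v q' cl f0 hq' (by omega) (by omega)]
        simp only [List.foldl_cons]
        rw [pvBFlood_noop _ _ _ _ hv]
      · rw [if_neg (by simp [List.contains_eq_mem, hv])]
        simp only
        have hdrop : pvUnv ps (PySem.Set.add v p) < pvUnv ps v := pvUnv_drop hp hv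
        -- evaluate the push loop
        rw [foldl_consif (fun d => ((p.1 + d.1, p.2 + d.2) : Int × Int))
          (fun nb => ps.contains nb && !(PySem.Set.add v p).contains nb) pvDirsA q',
          ← List.filter_reverse, ← List.map_reverse, dirsA_reverse]
        set v' := PySem.Set.add v p with hv'def
        set pushes := ((pvDirsB.map (fun d => ((p.1 + d.1, p.2 + d.2) : Int × Int))).filter
            (fun nb => ps.contains nb && !v'.contains nb)) with hpushdef
        have hpushps : ∀ x ∈ pushes, x ∈ ps := by
          intro x hx
          rw [hpushdef, List.mem_filter] at hx
          have h2 := hx.2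
          simp only [List.contains_eq_mem, Bool.and_eq_true, decide_eq_true_eq] at h2
          exact h2.1
        have hpushlen : pushes.length ≤ 4 := by
          have h1 : pushes.length ≤ (pvDirsB.map (fun d => ((p.1 + d.1, p.2 + d.2) : Int × Int))).length :=
            List.length_filter_le _ _
          simpa [pvDirsB] using h1
        rw [ih v' (pushes ++ q') (PySem.Set.add cl p) f0
          (by intro x hx; rcases List.mem_append.mp hx with h | h
              exacts [hpushps x h, hq' x h])
          (by rw [List.length_append]; omega)
          (by rw [List.length_append]; omega)]
        rw [List.foldl_append]
        simp only [List.foldl_cons]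
        -- now: pushes.foldl BIG (v', cl') = pvBFlood BIG (v, cl) p
        obtain ⟨k, hk⟩ : ∃ k, 1 + ps.length = k + 1 := ⟨ps.length, by omega⟩
        rw [hk, pvBFlood, if_neg (by simp [List.contains_eq_mem, hv])]
        simp only
        have hF : ∀ (st : List (Int × Int) × List (Int × Int)) (x : Int × Int),
            pvSub v' st.1 → x ∈ ps →
            pvBFlood ps (1 + ps.length) st x = pvBFlood ps k st x := by
          intro st x hsub hx
          have h1 : pvUnv ps st.1 ≤ pvUnv ps v' := pvUnv_mono hsub
          have h2 : pvUnv ps v ≤ ps.length := pvUnv_le_len ps v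
          obtain ⟨v0, cl0⟩ := st
          exact pvBFlood_stable ps (pvUnv ps v0) v0 cl0 x (1 + ps.length) k le_rfl
            (by simp only at h1; omega) (by simp only at h1; omega) hx
        have habs := fold_filter_absorb ps p v' (1 + ps.length) k hF
          pvDirsB (v', PySem.Set.add cl p) (pvSub_refl v')
        rw [hk] at habs
        exact congrArg (fun st => List.foldl (fun st x => pvBFlood ps (k + 1) st x) st q') habs

-- A's outer loop agrees with the fold of the intermediate flood, pointwise over any start list drawn from ps
theorem pvOuter (ps : List (Int × Int)) :
    ∀ (l : List (Int × Int)) (st : List (Int × Int) × List (List (Int × Int))),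
      (∀ x ∈ l, x ∈ ps) →
      l.foldl (fun st pos =>
          if st.1.contains pos then st
          else
            let r := pvADfs ps (1 + 5 * ps.length) st.1 [pos] []
            (r.1, st.2 ++ [r.2])) st
      = l.foldl (fun st pos =>
          if st.1.contains pos then st
          else
            let r := pvBFlood ps (1 + ps.length) (st.1, []) pos
            (r.1, st.2 ++ [r.2])) st := by
  intro l
  induction l with
  | nil => intro st _; rfl
  | cons pos l ih =>
    intro st hl
    have hpos : pos ∈ ps := hl pos (by simp)
    simp only [List.foldl_cons]
    by_cases hv : pos ∈ st.1
    · rw [if_pos (by simp [List.contains_eq_mem, hv]), if_pos (by simp [List.contains_eq_mem, hv])]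
      exact ih st (fun x hx => hl x (by simp [hx]))
    · rw [if_neg (by simp [List.contains_eq_mem, hv]), if_neg (by simp [List.contains_eq_mem, hv])]
      have hkey : pvADfs ps (1 + 5 * ps.length) st.1 [pos] []
          = pvBFlood ps (1 + ps.length) (st.1, []) pos := by
        have h := pvKey ps (5 * pvUnv ps st.1 + 1) st.1 [pos] [] (1 + 5 * ps.length)
          (by intro x hx; simp at hx; subst hx; exact hpos)
          (by simp)
          (by have := pvUnv_le_len ps st.1; simp only [List.length_cons, List.length_nil]; omega)
        rw [h]
        simp [List.foldl_cons]
      simp only [hkey]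
      exact ih _ (fun x hx => hl x (by simp [hx]))

-- ---- bridge from the intermediate flood to B's functional DFS ----

-- pvBDfs is a no-op off the grid (any fuel)
theorem pvBDfs_notin (ps : List (Int × Int)) (fuel : Nat) (v : List (Int × Int)) (p : Int × Int)
    (h : p ∉ ps) : pvBDfs ps fuel v p = (v, []) := by
  cases fuel with
  | zero => rfl
  | succ f => rw [pvBDfs]; simp [List.contains_eq_mem, h]

-- pvBDfs only grows visited
theorem pvBDfs_mono (ps : List (Int × Int)) :
    ∀ (fuel : Nat) (v : List (Int × Int)) (p : Int × Int), pvSub v (pvBDfs ps fuel v p).1 := by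
  intro fuel
  induction fuel with
  | zero => intro v p; exact pvSub_refl _
  | succ f ih =>
    intro v p
    rw [pvBDfs]
    split
    · exact pvSub_refl _
    · exact pvSub_trans (pvSub_add v p)
        (pvSub_trans (ih _ _) (pvSub_trans (ih _ _) (pvSub_trans (ih _ _) (ih _ _))))

-- every cell pvBDfs returns is visited afterwards
theorem pvBDfs_ret_visited (ps : List (Int × Int)) :
    ∀ (fuel : Nat) (v : List (Int × Int)) (p : Int × Int),
      ∀ x ∈ (pvBDfs ps fuel v p).2, x ∈ (pvBDfs ps fuel v p).1 := by
  intro fuel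
  induction fuel with
  | zero => intro v p x hx; cases hx
  | succ f ih =>
    intro v p x hx
    rw [pvBDfs] at hx ⊢
    by_cases hc : (!ps.contains p || v.contains p) = true
    · rw [if_pos hc] at hx; cases hx
    · rw [if_neg hc] at hx ⊢
      simp only [List.mem_cons, List.mem_append] at hx
      set v0 := PySem.Set.add v p with hv0
      set r1 := pvBDfs ps f v0 (p.1, p.2 - 1) with hr1
      set r2 := pvBDfs ps f r1.1 (p.1, p.2 + 1) with hr2
      set r3 := pvBDfs ps f r2.1 (p.1 - 1, p.2) with hr3
      set r4 := pvBDfs ps f r3.1 (p.1 + 1, p.2) with hr4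
      have m1 : pvSub v0 r1.1 := hr1 ▸ pvBDfs_mono ps f v0 _
      have m2 : pvSub r1.1 r2.1 := hr2 ▸ pvBDfs_mono ps f r1.1 _
      have m3 : pvSub r2.1 r3.1 := hr3 ▸ pvBDfs_mono ps f r2.1 _
      have m4 : pvSub r3.1 r4.1 := hr4 ▸ pvBDfs_mono ps f r3.1 _
      have i1 : ∀ y ∈ r1.2, y ∈ r1.1 := hr1 ▸ ih v0 _
      have i2 : ∀ y ∈ r2.2, y ∈ r2.1 := hr2 ▸ ih r1.1 _
      have i3 : ∀ y ∈ r3.2, y ∈ r3.1 := hr3 ▸ ih r2.1 _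
      have i4 : ∀ y ∈ r4.2, y ∈ r4.1 := hr4 ▸ ih r3.1 _
      rcases hx with rfl | ((h1 | h2) | h3) | h4
      · exact m4 _ (m3 _ (m2 _ (m1 _ ((PySem.Set.mem_add v x x).mpr (Or.inr rfl)))))
      · exact m4 _ (m3 _ (m2 _ (i1 x h1)))
      · exact m4 _ (m3 _ (i2 x h2))
      · exact m4 _ (i3 x h3)
      · exact i4 x h4

-- the intermediate flood IS B's DFS, with the cluster accumulated in front
theorem pvC (ps : List (Int × Int)) :
    ∀ (fuel : Nat) (v cl : List (Int × Int)) (p : Int × Int),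
      p ∈ ps → (∀ x ∈ cl, x ∈ v) →
      pvBFlood ps fuel (v, cl) p = ((pvBDfs ps fuel v p).1, cl ++ (pvBDfs ps fuel v p).2) := by
  intro fuel
  induction fuel with
  | zero => intro v cl p hp hcl; simp [pvBFlood, pvBDfs]
  | succ f ih =>
    intro v cl p hp hcl
    rw [pvBFlood, pvBDfs]
    by_cases hv : p ∈ v
    · rw [if_pos (by simp [List.contains_eq_mem, hv]),
        if_pos (by simp [List.contains_eq_mem, hv])]
      simp
    · rw [if_neg (by simp [List.contains_eq_mem, hv]),
        if_neg (by simp [List.contains_eq_mem, hp, hv])]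
      simp only [pvDirsB, List.foldl_cons, List.foldl_nil]
      have c1 : ((p.1 + (0:Int), p.2 + (-1:Int)) : Int × Int) = (p.1, p.2 - 1) := by
        rw [Prod.ext_iff]; exact ⟨by ring, by ring⟩
      have c2 : ((p.1 + (0:Int), p.2 + (1:Int)) : Int × Int) = (p.1, p.2 + 1) := by
        rw [Prod.ext_iff]; exact ⟨by ring, by ring⟩
      have c3 : ((p.1 + (-1:Int), p.2 + (0:Int)) : Int × Int) = (p.1 - 1, p.2) := by
        rw [Prod.ext_iff]; exact ⟨by ring, by ring⟩
      have c4 : ((p.1 + (1:Int), p.2 + (0:Int)) : Int × Int) = (p.1 + 1, p.2) := by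
        rw [Prod.ext_iff]; exact ⟨by ring, by ring⟩
      rw [c1, c2, c3, c4]
      have hpcl : p ∉ cl := fun h => hv (hcl p h)
      have hadd : PySem.Set.add cl p = cl ++ [p] := PySem.Set.add_of_not_mem hpcl
      set v0 := PySem.Set.add v p with hv0
      set r1 := pvBDfs ps f v0 (p.1, p.2 - 1) with hr1
      set r2 := pvBDfs ps f r1.1 (p.1, p.2 + 1) with hr2
      set r3 := pvBDfs ps f r2.1 (p.1 - 1, p.2) with hr3
      set r4 := pvBDfs ps f r3.1 (p.1 + 1, p.2) with hr4
      have m1 : pvSub v0 r1.1 := hr1 ▸ pvBDfs_mono ps f v0 _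
      have m2 : pvSub r1.1 r2.1 := hr2 ▸ pvBDfs_mono ps f r1.1 _
      have m3 : pvSub r2.1 r3.1 := hr3 ▸ pvBDfs_mono ps f r2.1 _
      have i1 : ∀ y ∈ r1.2, y ∈ r1.1 := hr1 ▸ pvBDfs_ret_visited ps f v0 _
      have i2 : ∀ y ∈ r2.2, y ∈ r2.1 := hr2 ▸ pvBDfs_ret_visited ps f r1.1 _
      have i3 : ∀ y ∈ r3.2, y ∈ r3.1 := hr3 ▸ pvBDfs_ret_visited ps f r2.1 _
      have hclv0 : ∀ x ∈ cl ++ [p], x ∈ v0 := by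
        intro x hx
        rcases List.mem_append.mp hx with h | h
        · exact pvSub_add v p x (hcl x h)
        · simp only [List.mem_singleton] at h
          subst h
          exact (PySem.Set.mem_add v x x).mpr (Or.inr rfl)
      -- step 1
      have e1 : (if ps.contains ((p.1, p.2 - 1) : Int × Int)
            then pvBFlood ps f (v0, PySem.Set.add cl p) (p.1, p.2 - 1)
            else (v0, PySem.Set.add cl p)) = (r1.1, (cl ++ [p]) ++ r1.2) := by
        rw [hadd]
        by_cases hq : ((p.1, p.2 - 1) : Int × Int) ∈ ps
        · rw [if_pos (by simp [List.contains_eq_mem, hq])]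
          exact hr1 ▸ ih v0 (cl ++ [p]) _ hq hclv0
        · rw [if_neg (by simp [List.contains_eq_mem, hq]), hr1, pvBDfs_notin ps f v0 _ hq]
          simp
      rw [e1]
      have hcl1 : ∀ x ∈ (cl ++ [p]) ++ r1.2, x ∈ r1.1 := by
        intro x hx
        rcases List.mem_append.mp hx with h | h
        · exact m1 x (hclv0 x h)
        · exact i1 x h
      -- step 2
      have e2 : (if ps.contains ((p.1, p.2 + 1) : Int × Int)
            then pvBFlood ps f (r1.1, (cl ++ [p]) ++ r1.2) (p.1, p.2 + 1)
            else (r1.1, (cl ++ [p]) ++ r1.2)) = (r2.1, ((cl ++ [p]) ++ r1.2) ++ r2.2) := by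
        by_cases hq : ((p.1, p.2 + 1) : Int × Int) ∈ ps
        · rw [if_pos (by simp [List.contains_eq_mem, hq])]
          exact hr2 ▸ ih r1.1 _ _ hq hcl1
        · rw [if_neg (by simp [List.contains_eq_mem, hq]), hr2, pvBDfs_notin ps f r1.1 _ hq]
          simp
      rw [e2]
      have hcl2 : ∀ x ∈ ((cl ++ [p]) ++ r1.2) ++ r2.2, x ∈ r2.1 := by
        intro x hx
        rcases List.mem_append.mp hx with h | h
        · exact m2 x (hcl1 x h)
        · exact i2 x h
      -- step 3
      have e3 : (if ps.contains ((p.1 - 1, p.2) : Int × Int)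
            then pvBFlood ps f (r2.1, ((cl ++ [p]) ++ r1.2) ++ r2.2) (p.1 - 1, p.2)
            else (r2.1, ((cl ++ [p]) ++ r1.2) ++ r2.2))
          = (r3.1, (((cl ++ [p]) ++ r1.2) ++ r2.2) ++ r3.2) := by
        by_cases hq : ((p.1 - 1, p.2) : Int × Int) ∈ ps
        · rw [if_pos (by simp [List.contains_eq_mem, hq])]
          exact hr3 ▸ ih r2.1 _ _ hq hcl2
        · rw [if_neg (by simp [List.contains_eq_mem, hq]), hr3, pvBDfs_notin ps f r2.1 _ hq]
          simp
      rw [e3]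
      have hcl3 : ∀ x ∈ (((cl ++ [p]) ++ r1.2) ++ r2.2) ++ r3.2, x ∈ r3.1 := by
        intro x hx
        rcases List.mem_append.mp hx with h | h
        · exact m3 x (hcl2 x h)
        · exact i3 x h
      -- step 4
      have e4 : (if ps.contains ((p.1 + 1, p.2) : Int × Int)
            then pvBFlood ps f (r3.1, (((cl ++ [p]) ++ r1.2) ++ r2.2) ++ r3.2) (p.1 + 1, p.2)
            else (r3.1, (((cl ++ [p]) ++ r1.2) ++ r2.2) ++ r3.2))
          = (r4.1, ((((cl ++ [p]) ++ r1.2) ++ r2.2) ++ r3.2) ++ r4.2) := by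
        by_cases hq : ((p.1 + 1, p.2) : Int × Int) ∈ ps
        · rw [if_pos (by simp [List.contains_eq_mem, hq])]
          exact hr4 ▸ ih r3.1 _ _ hq hcl3
        · rw [if_neg (by simp [List.contains_eq_mem, hq]), hr4, pvBDfs_notin ps f r3.1 _ hq]
          simp
      rw [e4]
      simp [List.append_assoc]

-- cluster nodup preservation
theorem pvBFlood_nodup (ps : List (Int × Int)) :
    ∀ (fuel : Nat) (st : List (Int × Int) × List (Int × Int)) (p : Int × Int),
      st.2.Nodup → (pvBFlood ps fuel st p).2.Nodup := by
  intro fuel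
  induction fuel with
  | zero => intro st p h; exact h
  | succ f ih =>
    intro st p h
    rw [pvBFlood]
    split
    · exact h
    · refine pv_foldl_pres _ (fun st => st.2.Nodup) ?_ pvDirsB
        (PySem.Set.add st.1 p, PySem.Set.add st.2 p) (PySem.Set.nodup_add st.2 p h)
      intro st2 x h2
      dsimp only
      split
      · exact ih st2 _ h2
      · exact h2

-- the intermediate outer fold IS pvBCollect
theorem pvO (ps : List (Int × Int)) :
    ∀ (l : List (Int × Int)) (v : List (Int × Int)) (acc : List (List (Int × Int))),
      (∀ x ∈ l, x ∈ ps) →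
      (l.foldl (fun st pos =>
          if st.1.contains pos then st
          else
            let r := pvBFlood ps (1 + ps.length) (st.1, []) pos
            (r.1, st.2 ++ [r.2])) (v, acc)).2
      = acc ++ pvBCollect ps (1 + ps.length) l v := by
  intro l
  induction l with
  | nil => intro v acc _; simp [pvBCollect]
  | cons pos rest ih =>
    intro v acc hl
    have hpos : pos ∈ ps := hl pos (by simp)
    have hrest : ∀ x ∈ rest, x ∈ ps := fun x hx => hl x (by simp [hx])
    simp only [List.foldl_cons]
    rw [pvBCollect]
    by_cases hv : pos ∈ v
    · rw [if_pos (by simp [List.contains_eq_mem, hv]),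
        if_pos (by simp [List.contains_eq_mem, hv])]
      exact ih v acc hrest
    · rw [if_neg (by simp [List.contains_eq_mem, hv]),
        if_neg (by simp [List.contains_eq_mem, hv])]
      have hC := pvC ps (1 + ps.length) v [] pos hpos (by simp)
      have hn : (pvBFlood ps (1 + ps.length) (v, []) pos).2.Nodup :=
        pvBFlood_nodup ps (1 + ps.length) (v, []) pos (by simp)
      rw [hC] at hn ⊢
      simp only [List.nil_append] at hn ⊢
      rw [PySem.Set.ofList_eq_self_of_nodup _ hn]
      rw [ih (pvBDfs ps (1 + ps.length) v pos).1 (acc ++ [(pvBDfs ps (1 + ps.length) v pos).2]) hrest]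
      simp

-- ===== VERDICT (by name: the statement is the Claim_ definition above) =====
theorem find_clusters_2d_spec : Claim_equal_find_clusters_2d := by
  intro positions _
  unfold Spec_find_clusters_2d find_clusters_2d find_clusters_2d_alt
  simp only
  rw [pvOuter (PySem.Set.ofList positions) (PySem.Set.ofList positions) ([], [])
    (fun x hx => hx)]
  rw [pvO (PySem.Set.ofList positions) (PySem.Set.ofList positions) [] [] (fun x hx => hx)]
  rfl
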